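-- pv_equiv track=rewrite | github.com/yannickloth/W33-Theory | scripts/w33_leech_monster.py | poly_power
-- ===== SOURCE A (Python) =====
-- def poly_power(coeffs, power: int, n_terms: int):
--     """Compute first n_terms coefficients of (sum coeffs[i] q^i)^power."""
--     out = [0] * n_terms
--     out[0] = 1 if power == 0 else coeffs[0] ** power
--     # naive convolution (sufficient for small n_terms)
--     from itertools import product
--
--     # start from 1st power by repeated convolution
--     cur = coeffs[:n_terms]
--     for _ in range(1, power):
--         nxt = [0] * n_terms
--         for i in range(n_terms):
--             if cur[i] == 0:
--                 continue
--             for j in range(n_terms - i):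
--                 if j >= len(coeffs):
--                     break
--                 nxt[i + j] += cur[i] * coeffs[j]
--         cur = nxt
--     return cur[:n_terms]
-- ===== SOURCE B (Python) =====
-- def poly_power(coeffs, power: int, n_terms: int):
--     """Compute first n_terms coefficients of (sum coeffs[i] q^i)^power."""
--     if power == 0:
--         return [1] + [0] * (n_terms - 1)
--     if power <= 1:
--         return coeffs[:n_terms]
--
--     def conv(a, b):
--         # gather the k-th coefficient of a*b directly, truncated at n_terms
--         return [
--             sum(a[i] * b[k - i]
--                 for i in range(max(0, k - len(b) + 1), min(k + 1, len(a))))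
--             for k in range(n_terms)
--         ]
--
--     # exponentiation by squaring on truncated polynomials
--     base = coeffs[:n_terms]
--     result = None
--     p = power
--     while p:
--         if p & 1:
--             result = base if result is None else conv(result, base)
--         if p > 1:
--             base = conv(base, base)
--         p >>= 1
--     return result
-- ===== Notes on version B (the rewrite author's own statement) =====
-- stated objective: faster
-- what changed: Replaces A's power-1 repeated scatter convolutions by exponentiation-by-squaring of truncated polynomials with a gather-style (per-output-coefficient) convolution; power==0 now returns the constant polynomial 1 instead of A's coeffs[:n_terms].
-- intended difference: For power == 0 (when coeffs[:n_terms] is not already [1,0,...,0]) A returns coeffs[:n_terms] because its loop never runs and the computed out[0]=1 is discarded, while B returns [1,0,...,0], the correct coefficients of p^0 = 1. — e.g. on poly_power([2], 0, 1): A returns [2], B returns [1]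
import Mathlib
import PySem

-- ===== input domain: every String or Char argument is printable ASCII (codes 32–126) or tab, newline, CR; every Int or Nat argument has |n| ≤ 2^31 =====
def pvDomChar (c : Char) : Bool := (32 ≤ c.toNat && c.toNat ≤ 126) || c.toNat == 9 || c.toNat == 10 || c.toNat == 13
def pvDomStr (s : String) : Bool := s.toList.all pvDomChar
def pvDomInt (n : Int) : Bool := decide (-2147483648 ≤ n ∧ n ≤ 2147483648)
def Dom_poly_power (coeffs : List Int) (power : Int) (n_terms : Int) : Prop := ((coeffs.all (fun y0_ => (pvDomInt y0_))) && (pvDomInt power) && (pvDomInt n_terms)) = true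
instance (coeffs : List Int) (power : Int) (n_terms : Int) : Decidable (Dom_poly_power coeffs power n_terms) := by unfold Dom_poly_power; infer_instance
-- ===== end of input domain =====

-- B replaces A's (power-1)-fold repeated scatter convolution by exponentiation by squaring of
-- n_terms-truncated polynomials (gather-style convolution); for power == 0, B returns the
-- coefficients of the constant polynomial 1 where A returns coeffs[:n_terms] (see D_ below).

-- ===== PORT A =====
-- inner loop `for j in range(n_terms - i): if j >= len(coeffs): break: nxt[i+j] += cur[i]*coeffs[j]`
-- (the break makes it a loop over range(min(n_terms - i, len(coeffs)))); indexing is via getD,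
-- in range wherever Python does not raise (Pre_ excludes A's IndexError inputs).
def pvRowA (coeffs : List Int) (nt : Nat) (ci : Int) (i : Nat) (nxt : List Int) : List Int :=
  (List.range (min (nt - i) coeffs.length)).foldl
    (fun nxt j => nxt.set (i + j) (nxt.getD (i + j) 0 + ci * coeffs.getD j 0)) nxt

-- one iteration of A's outer loop: `nxt = [0]*n_terms; for i in range(n_terms): …; cur = nxt`
def pvStepA (coeffs : List Int) (nt : Nat) (cur : List Int) : List Int :=
  (List.range nt).foldl
    (fun nxt i => if cur.getD i 0 = 0 then nxt else pvRowA coeffs nt (cur.getD i 0) i nxt)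
    (List.replicate nt 0)

-- A's `out` is write-only dead state except that computing out[0] raises (n_terms < 1, empty
-- coeffs, 0 ** negative) — those inputs are excluded by Pre_ — or yields a float (power < 0),
-- so it is not ported.
def poly_power (coeffs : List Int) (power : Int) (n_terms : Int) : List Int :=
  let cur0 := PySem.List.slice coeffs none (some n_terms)           -- cur = coeffs[:n_terms]
  let cur := (PySem.List.pyRange 1 power 1).foldl                   -- for _ in range(1, power)
    (fun cur _ => pvStepA coeffs n_terms.toNat cur) cur0
  PySem.List.slice cur none (some n_terms)                          -- return cur[:n_terms]

-- ===== PORT B =====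
-- conv(a, b): gather-style truncated product; the generator sum over range(lo, hi) is ported as
-- a map/sum over List.range' lo (hi - lo); a[i] and b[k-i] are in range for lo ≤ i < hi,
-- so getD is exact here.
def pvConv (n_terms : Int) (a b : List Int) : List Int :=
  (List.range n_terms.toNat).map (fun k =>
    ((List.range' ((k + 1) - b.length) (min (k + 1) a.length - ((k + 1) - b.length))).map
      (fun i => a.getD i 0 * b.getD (k - i) 0)).sum)

-- the `while p:` loop; `p & 1` is `p % 2 = 1`, `p >>= 1` is `p / 2` on the nonnegative p of this
-- branch; the extra fuel argument (initialised to p, which bounds the iteration count) only makes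
-- the same computation structurally recursive.
def pvBLoop (n_terms : Int) : Nat → List Int → Option (List Int) → Nat → Option (List Int)
  | 0, _, result, _ => result
  | fuel + 1, base, result, p =>
    if p = 0 then result
    else
      pvBLoop n_terms fuel
        (if 1 < p then pvConv n_terms base base else base)   -- if p > 1: base = conv(base, base)
        (if p % 2 = 1 then                                   -- if p & 1:
          some (match result with
                | none => base                               --   result = base
                | some r => pvConv n_terms r base)           --   result = conv(result, base)
          else result)
        (p / 2)                                              -- p >>= 1

def poly_power_alt (coeffs : List Int) (power : Int) (n_terms : Int) : List Int :=
  if power = 0 then (1 : Int) :: List.replicate (n_terms - 1).toNat 0   -- [1] + [0]*(n_terms-1)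
  else if power ≤ 1 then PySem.List.slice coeffs none (some n_terms)    -- coeffs[:n_terms]
  else
    (pvBLoop n_terms power.toNat (PySem.List.slice coeffs none (some n_terms)) none power.toNat).getD []

-- ===== PRECONDITION & SPEC =====
-- Pre_ excludes exactly the inputs where A raises: IndexError on out[0] when n_terms < 1;
-- IndexError on coeffs[0] when coeffs is empty with power ≠ 0; ZeroDivisionError from
-- coeffs[0] ** power when power < 0 and coeffs[0] = 0; IndexError on cur[i] when power ≥ 2
-- and len(coeffs) < n_terms.
def Pre_poly_power (coeffs : List Int) (power : Int) (n_terms : Int) : Prop :=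
  1 ≤ n_terms ∧
    (power = 0 ∨
      (coeffs ≠ [] ∧ (0 ≤ power ∨ coeffs.getD 0 0 ≠ 0) ∧
        (power ≤ 1 ∨ n_terms ≤ (coeffs.length : Int))))
instance (coeffs : List Int) (power : Int) (n_terms : Int) : Decidable (Pre_poly_power coeffs power n_terms) := by
  unfold Pre_poly_power; infer_instance

def pvWitness_poly_power : List Int × Int × Int := ([1, 2], 2, 2)

-- For power == 0 (whenever coeffs[:n_terms] is not already [1,0,…,0]) A returns coeffs[:n_terms]
-- — its loop never runs and the computed out[0] = 1 is discarded — while B returns [1,0,…,0],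
-- the correct first n_terms coefficients of p^0 = 1.
def D_poly_power (coeffs : List Int) (power : Int) (n_terms : Int) : Prop :=
  power = 0 ∧ coeffs.take n_terms.toNat ≠ (1 : Int) :: List.replicate (n_terms.toNat - 1) 0
instance (coeffs : List Int) (power : Int) (n_terms : Int) : Decidable (D_poly_power coeffs power n_terms) := by
  unfold D_poly_power; infer_instance

def Spec_poly_power (coeffs : List Int) (power : Int) (n_terms : Int) (out : List Int) : Prop :=
  ¬ D_poly_power coeffs power n_terms → out = poly_power_alt coeffs power n_terms
instance (coeffs : List Int) (power : Int) (n_terms : Int) (out : List Int) : Decidable (Spec_poly_power coeffs power n_terms out) := by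
  unfold Spec_poly_power; infer_instance

def pvDiffWitness_poly_power : List Int × Int × Int := ([2], 0, 1)
def pvDiffWitnessOut_poly_power : (List Int) × (List Int) := ([2], [1])

-- ===== CLAIM (what is proved, stated in full; the proofs are below) =====
def Claim_unchanged_poly_power : Prop := ∀ (coeffs : List Int) (power : Int) (n_terms : Int), Dom_poly_power coeffs power n_terms → Pre_poly_power coeffs power n_terms → Spec_poly_power coeffs power n_terms (poly_power coeffs power n_terms)
def Claim_changed_poly_power : Prop := Dom_poly_power (pvDiffWitness_poly_power.1) (pvDiffWitness_poly_power.2.1) (pvDiffWitness_poly_power.2.2) ∧ Pre_poly_power (pvDiffWitness_poly_power.1) (pvDiffWitness_poly_power.2.1) (pvDiffWitness_poly_power.2.2) ∧ D_poly_power (pvDiffWitness_poly_power.1) (pvDiffWitness_poly_power.2.1) (pvDiffWitness_poly_power.2.2) ∧ poly_power (pvDiffWitness_poly_power.1) (pvDiffWitness_poly_power.2.1) (pvDiffWitness_poly_power.2.2) = pvDiffWitnessOut_poly_power.1 ∧ poly_power_alt (pvDiffWitness_poly_power.1) (pvDiffWitness_poly_power.2.1) (pvDiffWitness_poly_power.2.2)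 = pvDiffWitnessOut_poly_power.2 ∧ pvDiffWitnessOut_poly_power.1 ≠ pvDiffWitnessOut_poly_power.2
def Claim_exact_poly_power : Prop := ∀ (coeffs : List Int) (power : Int) (n_terms : Int), Dom_poly_power coeffs power n_terms → Pre_poly_power coeffs power n_terms → D_poly_power coeffs power n_terms → poly_power coeffs power n_terms ≠ poly_power_alt coeffs power n_terms
-- ===== LEMMAS AND PROOFS =====

-- the common semantic model: a list of coefficients as a polynomial, and the first-nt-coefficients list
noncomputable def pvToP (l : List Int) : Polynomial ℤ :=
  l.foldr (fun a p => Polynomial.C a + Polynomial.X * p) 0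

noncomputable def pvTn (nt : Nat) (p : Polynomial ℤ) : List Int :=
  (List.range nt).map (fun k => p.coeff k)

theorem pvToP_coeff (l : List Int) (k : Nat) : (pvToP l).coeff k = l.getD k 0 := by
  induction l generalizing k with
  | nil => simp [pvToP]
  | cons a t ih =>
    have hc : pvToP (a :: t) = Polynomial.C a + Polynomial.X * pvToP t := rfl
    cases k with
    | zero =>
      rw [hc, Polynomial.coeff_add, Polynomial.coeff_C, Polynomial.coeff_X_mul_zero]
      simp
    | succ k =>
      rw [hc, Polynomial.coeff_add, Polynomial.coeff_C, Polynomial.coeff_X_mul, ih k]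
      simp

theorem pvTn_length (nt : Nat) (p : Polynomial ℤ) : (pvTn nt p).length = nt := by
  simp [pvTn]

theorem pvTn_getD (nt : Nat) (p : Polynomial ℤ) (k : Nat) (hk : k < nt) :
    (pvTn nt p).getD k 0 = p.coeff k := by
  simpa [pvTn] using PySem.List.getD_map_range (fun k => p.coeff k) nt k 0 hk

theorem pvToP_Tn (nt : Nat) (p : Polynomial ℤ) (k : Nat) (hk : k < nt) :
    (pvToP (pvTn nt p)).coeff k = p.coeff k := by
  rw [pvToP_coeff, pvTn_getD nt p k hk]

theorem pvTn_congr (nt : Nat) (p q : Polynomial ℤ) (h : ∀ k < nt, p.coeff k = q.coeff k) :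
    pvTn nt p = pvTn nt q := by
  unfold pvTn
  exact List.map_congr_left (fun k hk => h k (List.mem_range.mp hk))

theorem pvMul_apx (nt : Nat) (p p' q q' : Polynomial ℤ)
    (hp : ∀ k < nt, p.coeff k = p'.coeff k) (hq : ∀ k < nt, q.coeff k = q'.coeff k) :
    ∀ k < nt, (p * q).coeff k = (p' * q').coeff k := by
  intro k hk
  rw [Polynomial.coeff_mul, Polynomial.coeff_mul]
  refine Finset.sum_congr rfl (fun x hx => ?_)
  have hx' := Finset.mem_antidiagonal.mp hx
  rw [hp x.1 (by omega), hq x.2 (by omega)]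

theorem pvPow_apx (nt : Nat) (p q : Polynomial ℤ)
    (h : ∀ k < nt, p.coeff k = q.coeff k) (m : Nat) :
    ∀ k < nt, (p ^ m).coeff k = (q ^ m).coeff k := by
  induction m with
  | zero => intro k hk; rfl
  | succ m ih =>
    intro k hk
    rw [pow_succ, pow_succ]
    exact pvMul_apx nt _ _ _ _ ih h k hk

-- sum of a mapped List.range'
theorem pvSum_range' (g : Nat → Int) (s n : Nat) :
    ((List.range' s n).map g).sum = ∑ i ∈ Finset.range n, g (s + i) := by
  induction n with
  | zero => simp
  | succ n ih => rw [List.range'_concat, Finset.sum_range_succ]; simp [ih]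

-- the gather convolution computes the truncated product
theorem pvConv_eq (n_terms : Int) (a b : List Int) :
    pvConv n_terms a b = pvTn n_terms.toNat (pvToP a * pvToP b) := by
  unfold pvConv pvTn
  refine List.map_congr_left (fun k hk => ?_)
  have hk' := List.mem_range.mp hk
  set lo := (k + 1) - b.length with hlo
  set hi := min (k + 1) a.length with hhi
  rw [Polynomial.coeff_mul, Finset.Nat.sum_antidiagonal_eq_sum_range_succ_mk]
  simp only [pvToP_coeff]
  rw [pvSum_range' (fun i => a.getD i 0 * b.getD (k - i) 0) lo (hi - lo)]
  have hIco : ∑ i ∈ Finset.range (hi - lo), a.getD (lo + i) 0 * b.getD (k - (lo + i)) 0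
      = ∑ i ∈ Finset.Ico lo hi, a.getD i 0 * b.getD (k - i) 0 := by
    rcases Nat.le_total lo hi with h | h
    · rw [Finset.sum_Ico_eq_sum_range]
    · rw [Finset.Ico_eq_empty (by omega), (by omega : hi - lo = 0)]
      simp
  rw [hIco]
  refine Finset.sum_subset ?_ ?_
  · intro i hi'
    have := Finset.mem_Ico.mp hi'
    exact Finset.mem_range.mpr (by omega)
  · intro i hi1 hi2
    have h1 := Finset.mem_range.mp hi1
    rcases Decidable.em (i < lo) with h | h
    · have : b.length ≤ k - i := by omega
      rw [List.getD_eq_default _ _ this, mul_zero]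
    · have : a.length ≤ i := by
        have : ¬ i < hi := fun hlt => hi2 (Finset.mem_Ico.mpr ⟨by omega, hlt⟩)
        omega
      rw [List.getD_eq_default _ _ this, zero_mul]

-- length preservation for A's inner and outer loops
theorem pvRowFold_len (coeffs : List Int) (ci : Int) (i : Nat) :
    ∀ (m : Nat) (nxt : List Int),
      ((List.range m).foldl
        (fun nxt j => nxt.set (i + j) (nxt.getD (i + j) 0 + ci * coeffs.getD j 0)) nxt).length
        = nxt.length := by
  intro m
  induction m with
  | zero => intro nxt; rfl
  | succ m ih =>
    intro nxt
    rw [List.range_succ, List.foldl_append]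
    simp only [List.foldl_cons, List.foldl_nil, List.length_set]
    exact ih nxt

theorem pvRowA_len (coeffs : List Int) (nt : Nat) (ci : Int) (i : Nat) (nxt : List Int) :
    (pvRowA coeffs nt ci i nxt).length = nxt.length :=
  pvRowFold_len coeffs ci i _ nxt

-- entrywise effect of A's inner loop
theorem pvRowFold_getD (coeffs : List Int) (ci : Int) (i : Nat) :
    ∀ (m : Nat) (nxt : List Int) (k : Nat), i + m ≤ nxt.length → k < nxt.length →
      ((List.range m).foldl
        (fun nxt j => nxt.set (i + j) (nxt.getD (i + j) 0 + ci * coeffs.getD j 0)) nxt).getD k 0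
        = nxt.getD k 0 + (if i ≤ k ∧ k - i < m then ci * coeffs.getD (k - i) 0 else 0) := by
  intro m
  induction m with
  | zero =>
    intro nxt k _ _
    simp
  | succ m ih =>
    intro nxt k hm hk
    rw [List.range_succ, List.foldl_append]
    simp only [List.foldl_cons, List.foldl_nil]
    set L := (List.range m).foldl
      (fun nxt j => nxt.set (i + j) (nxt.getD (i + j) 0 + ci * coeffs.getD j 0)) nxt with hL
    have hLlen : L.length = nxt.length := pvRowFold_len coeffs ci i m nxt
    rcases Decidable.em (i + m = k) with he | he
    · rw [List.getD_eq_getElem?_getD, List.getElem?_set]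
      rw [if_pos he, if_pos (by omega)]
      simp only [Option.getD_some]
      rw [ih nxt (i + m) (by omega) (by omega)]
      have h1 : ¬ (i ≤ i + m ∧ (i + m) - i < m) := by omega
      have h2 : i ≤ k ∧ k - i < m + 1 := by omega
      rw [if_neg h1, if_pos h2]
      rw [← he, (by omega : i + m - i = m)]
      ring
    · rw [List.getD_eq_getElem?_getD, List.getElem?_set, if_neg he,
        ← List.getD_eq_getElem?_getD]
      rw [ih nxt k (by omega) hk]
      have : (i ≤ k ∧ k - i < m + 1) ↔ (i ≤ k ∧ k - i < m) := by omega
      simp only [this]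

theorem pvRowA_getD (coeffs : List Int) (nt : Nat) (ci : Int) (i : Nat) (nxt : List Int)
    (hlen : nxt.length = nt) (hi : i ≤ nt) (k : Nat) (hk : k < nt) :
    (pvRowA coeffs nt ci i nxt).getD k 0
      = nxt.getD k 0 +
        (if i ≤ k ∧ k - i < min (nt - i) coeffs.length then ci * coeffs.getD (k - i) 0 else 0) :=
  pvRowFold_getD coeffs ci i _ nxt k (by omega) (by omega)

theorem pvStepFold_len (coeffs : List Int) (nt : Nat) (cur : List Int) :
    ∀ (m : Nat),
      ((List.range m).foldl
        (fun nxt i => if cur.getD i 0 = 0 then nxt else pvRowA coeffs nt (cur.getD i 0) i nxt)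
        (List.replicate nt 0)).length = nt := by
  intro m
  induction m with
  | zero => simp
  | succ m ih =>
    rw [List.range_succ, List.foldl_append]
    simp only [List.foldl_cons, List.foldl_nil]
    split
    · exact ih
    · rw [pvRowA_len]; exact ih

theorem pvStepA_len (coeffs : List Int) (nt : Nat) (cur : List Int) :
    (pvStepA coeffs nt cur).length = nt :=
  pvStepFold_len coeffs nt cur nt

theorem pvStepFold_getD (coeffs : List Int) (nt : Nat) (cur : List Int) (k : Nat) (hk : k < nt) :
    ∀ (m : Nat), m ≤ nt →
      ((List.range m).foldl
        (fun nxt i => if cur.getD i 0 = 0 then nxt else pvRowA coeffs nt (cur.getD i 0) i nxt)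
        (List.replicate nt 0)).getD k 0
        = ∑ i ∈ Finset.range m,
            (if i ≤ k ∧ k - i < min (nt - i) coeffs.length
              then cur.getD i 0 * coeffs.getD (k - i) 0 else 0) := by
  intro m
  induction m with
  | zero =>
    intro _
    simp [List.getD_eq_getElem?_getD, hk]
  | succ m ih =>
    intro hm
    rw [List.range_succ, List.foldl_append]
    simp only [List.foldl_cons, List.foldl_nil]
    rw [Finset.sum_range_succ, ← ih (by omega)]
    set L := (List.range m).foldl
      (fun nxt i => if cur.getD i 0 = 0 then nxt else pvRowA coeffs nt (cur.getD i 0) i nxt)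
      (List.replicate nt 0) with hLdef
    have hLlen : L.length = nt := pvStepFold_len coeffs nt cur m
    rcases Decidable.em (cur.getD m 0 = 0) with h0 | h0
    · rw [if_pos h0, h0]
      simp
    · rw [if_neg h0, pvRowA_getD coeffs nt _ m L hLlen (by omega) k hk]

theorem pvStepA_eq (coeffs : List Int) (nt : Nat) (cur : List Int) :
    pvStepA coeffs nt cur = pvTn nt (pvToP cur * pvToP coeffs) := by
  refine List.ext_getElem (by rw [pvStepA_len, pvTn_length]) (fun k h1 h2 => ?_)
  have hk : k < nt := by rwa [pvStepA_len] at h1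
  have lhs : (pvStepA coeffs nt cur).getD k 0
      = ∑ i ∈ Finset.range nt,
          (if i ≤ k ∧ k - i < min (nt - i) coeffs.length
            then cur.getD i 0 * coeffs.getD (k - i) 0 else 0) :=
    pvStepFold_getD coeffs nt cur k hk nt le_rfl
  rw [← List.getD_eq_getElem _ 0 h1, ← List.getD_eq_getElem _ 0 h2,
    lhs, pvTn_getD nt _ k hk]
  rw [Polynomial.coeff_mul, Finset.Nat.sum_antidiagonal_eq_sum_range_succ_mk]
  simp only [pvToP_coeff]
  have hstep1 : ∑ i ∈ Finset.range nt,
        (if i ≤ k ∧ k - i < min (nt - i) coeffs.length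
          then cur.getD i 0 * coeffs.getD (k - i) 0 else 0)
      = ∑ i ∈ Finset.range (k + 1),
        (if i ≤ k ∧ k - i < min (nt - i) coeffs.length
          then cur.getD i 0 * coeffs.getD (k - i) 0 else 0) := by
    refine (Finset.sum_subset (fun x hx => Finset.mem_range.mpr ?_) (fun i _ hi2 => ?_)).symm
    · have := Finset.mem_range.mp hx; omega
    · exact if_neg (fun hc => hi2 (Finset.mem_range.mpr (Nat.lt_succ_of_le hc.1)))
  rw [hstep1]
  refine Finset.sum_congr rfl (fun i hi => ?_)
  have hik : i ≤ k := by have := Finset.mem_range.mp hi; omega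
  rcases Decidable.em (k - i < coeffs.length) with h2' | h2'
  · rw [if_pos ⟨hik, by omega⟩]
  · rw [if_neg (by omega), List.getD_eq_default coeffs 0 (by omega : coeffs.length ≤ k - i), mul_zero]

-- a foldl that ignores the list elements is an iterate
theorem pvFoldl_const {α β : Type} (l : List α) (f : β → β) (init : β) :
    l.foldl (fun c _ => f c) init = f^[l.length] init := by
  induction l generalizing init with
  | nil => rfl
  | cons a t ih => simp [ih, Function.iterate_succ_apply]

theorem pvIterA (coeffs : List Int) (nt : Nat) (cur0 : List Int) :
    ∀ m : Nat, (pvStepA coeffs nt)^[m + 1] cur0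
      = pvTn nt (pvToP cur0 * (pvToP coeffs) ^ (m + 1)) := by
  intro m
  induction m with
  | zero => rw [Function.iterate_one, pvStepA_eq, pow_one]
  | succ m ih =>
    rw [Function.iterate_succ_apply', ih, pvStepA_eq]
    refine (pvTn_congr nt _ _ (fun k hk => ?_))
    have h1 := pvMul_apx nt _ (pvToP cur0 * (pvToP coeffs) ^ (m + 1)) (pvToP coeffs) (pvToP coeffs)
      (fun k hk => pvToP_Tn nt _ k hk) (fun _ _ => rfl) k hk
    rw [h1]
    congr 1
    ring

-- the binary-exponentiation loop, result present
theorem pvBLoop_some (n_terms : Int) :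
    ∀ (fuel p : Nat), 1 ≤ p → p ≤ fuel → ∀ (base r : List Int),
      pvBLoop n_terms fuel base (some r) p
        = some (pvTn n_terms.toNat (pvToP r * (pvToP base) ^ p)) := by
  intro fuel
  induction fuel with
  | zero => intro p hp hf base r; omega
  | succ fuel ih =>
    intro p hp hf base r
    rw [pvBLoop, if_neg (by omega)]
    rcases Decidable.em (p = 1) with h1 | h1
    · subst h1
      rw [if_neg (by omega : ¬ (1:Nat) < 1), if_pos (show (1:Nat) % 2 = 1 from rfl)]
      have hz : ∀ b r', pvBLoop n_terms fuel b (some r') 0 = some r' := by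
        intro b r'; cases fuel <;> rfl
      show pvBLoop n_terms fuel base (some (pvConv n_terms r base)) (1 / 2)
        = some (pvTn n_terms.toNat (pvToP r * pvToP base ^ 1))
      rw [(show (1:Nat) / 2 = 0 from rfl), hz, pvConv_eq, pow_one]
    · -- p ≥ 2
      have hq1 : 1 ≤ p / 2 := by omega
      have hqf : p / 2 ≤ fuel := by omega
      rw [if_pos (show 1 < p by omega)]
      rcases Nat.even_or_odd p with he | ho
      · have hpar : ¬ p % 2 = 1 := by rcases he with ⟨t, ht⟩; omega
        rw [if_neg hpar, ih (p / 2) hq1 hqf _ r]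
        refine congrArg some (pvTn_congr _ _ _ (fun k hk => ?_))
        rw [pvConv_eq]
        have := pvMul_apx n_terms.toNat (pvToP r) (pvToP r) _ ((pvToP base * pvToP base) ^ (p / 2))
          (fun _ _ => rfl)
          (pvPow_apx n_terms.toNat _ _ (fun k hk => pvToP_Tn _ _ k hk) (p / 2)) k hk
        rw [this]
        have hpow : (pvToP base * pvToP base) ^ (p / 2) = pvToP base ^ p := by
          rw [← pow_two, ← pow_mul, (show 2 * (p / 2) = p by omega)]
        rw [hpow]
      · have hpar : p % 2 = 1 := Nat.odd_iff.mp ho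
        rw [if_pos hpar]
        show pvBLoop n_terms fuel (pvConv n_terms base base) (some (pvConv n_terms r base)) (p / 2)
          = some (pvTn n_terms.toNat (pvToP r * pvToP base ^ p))
        rw [ih (p / 2) hq1 hqf _ (pvConv n_terms r base)]
        refine congrArg some (pvTn_congr _ _ _ (fun k hk => ?_))
        rw [pvConv_eq, pvConv_eq]
        have := pvMul_apx n_terms.toNat _ (pvToP r * pvToP base) _
          ((pvToP base * pvToP base) ^ (p / 2))
          (fun k hk => pvToP_Tn _ _ k hk)
          (pvPow_apx n_terms.toNat _ _ (fun k hk => pvToP_Tn _ _ k hk) (p / 2)) k hk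
        rw [this]
        have hpow : (pvToP base * pvToP base) ^ (p / 2) = pvToP base ^ (2 * (p / 2)) := by
          rw [← pow_two, ← pow_mul]
        rw [hpow, mul_assoc, ← pow_succ', (show 2 * (p / 2) + 1 = p by omega)]

theorem pvBLoop_none (n_terms : Int) :
    ∀ (fuel p : Nat), 2 ≤ p → p ≤ fuel → ∀ (base : List Int),
      pvBLoop n_terms fuel base none p
        = some (pvTn n_terms.toNat ((pvToP base) ^ p)) := by
  intro fuel
  induction fuel with
  | zero => intro p hp hf base; omega
  | succ fuel ih =>
    intro p hp hf base
    rw [pvBLoop, if_neg (by omega), if_pos (show 1 < p by omega)]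
    have hq1 : 1 ≤ p / 2 := by omega
    have hqf : p / 2 ≤ fuel := by omega
    rcases Nat.even_or_odd p with he | ho
    · have hpar : ¬ p % 2 = 1 := by rcases he with ⟨t, ht⟩; omega
      rw [if_neg hpar]
      rcases Decidable.em (p / 2 = 1) with hq | hq
      · -- here p is even, so p = 2
        have hp2 : p = 2 := by omega
        rw [hq]
        have hone : ∀ b, pvBLoop n_terms fuel b none 1 = some b := by
          intro b
          cases fuel with
          | zero => omega
          | succ fuel' =>
            rw [pvBLoop, if_neg (by omega),
              if_neg (by omega : ¬ (1:Nat) < 1), if_pos (show (1:Nat) % 2 = 1 from rfl)]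
            show pvBLoop n_terms fuel' b (some b) (1 / 2) = some b
            rw [(show (1:Nat) / 2 = 0 from rfl)]
            cases fuel' <;> rfl
        rw [hone, pvConv_eq, hp2]
        exact congrArg some (congrArg _ (by ring))
      · have hq2 : 2 ≤ p / 2 := by omega
        rw [ih (p / 2) hq2 hqf _]
        refine congrArg some (pvTn_congr _ _ _ (fun k hk => ?_))
        rw [pvConv_eq]
        have := pvPow_apx n_terms.toNat _ (pvToP base * pvToP base)
          (fun k hk => pvToP_Tn _ _ k hk) (p / 2) k hk
        rw [this]
        have hpow : (pvToP base * pvToP base) ^ (p / 2) = pvToP base ^ p := by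
          rw [← pow_two, ← pow_mul, (show 2 * (p / 2) = p by omega)]
        rw [hpow]
    · have hpar : p % 2 = 1 := Nat.odd_iff.mp ho
      rw [if_pos hpar]
      show pvBLoop n_terms fuel (pvConv n_terms base base) (some base) (p / 2)
        = some (pvTn n_terms.toNat (pvToP base ^ p))
      rw [pvBLoop_some n_terms fuel (p / 2) hq1 hqf _ base]
      refine congrArg some (pvTn_congr _ _ _ (fun k hk => ?_))
      rw [pvConv_eq]
      have := pvMul_apx n_terms.toNat (pvToP base) (pvToP base) _
        ((pvToP base * pvToP base) ^ (p / 2)) (fun _ _ => rfl)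
        (pvPow_apx n_terms.toNat _ _ (fun k hk => pvToP_Tn _ _ k hk) (p / 2)) k hk
      rw [this]
      have hpow : (pvToP base * pvToP base) ^ (p / 2) = pvToP base ^ (2 * (p / 2)) := by
        rw [← pow_two, ← pow_mul]
      rw [hpow, ← pow_succ', (show 2 * (p / 2) + 1 = p by omega)]

-- pyRange(1, power) facts used by A
theorem pvPyRange_nil (power : Int) (h : power ≤ 1) : PySem.List.pyRange 1 power 1 = [] := by
  unfold PySem.List.pyRange
  rw [if_neg (by omega)]
  simp only
  rw [if_pos (by omega), if_neg (by omega)]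
  rfl

theorem pvPyRange_len (power : Int) (h : 2 ≤ power) :
    (PySem.List.pyRange 1 power 1).length = (power - 1).toNat := by
  unfold PySem.List.pyRange
  rw [if_neg (by omega)]
  simp only
  rw [if_pos (by omega), if_pos (by omega)]
  simp only [List.length_map, List.length_range]
  congr 1
  omega

-- A's value when the outer loop never runs (power ≤ 1), under 0 ≤ n_terms
theorem pvA_low (coeffs : List Int) (power : Int) (n_terms : Int)
    (hp : power ≤ 1) (hn : 0 ≤ n_terms) :
    poly_power coeffs power n_terms = coeffs.take n_terms.toNat := by
  unfold poly_power
  rw [pvPyRange_nil power hp]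
  simp only [List.foldl_nil]
  rw [PySem.List.slice_to _ hn, PySem.List.slice_to _ hn, List.take_take, min_self]

-- coefficients of coeffs[:n_terms] agree with coeffs below n_terms
theorem pvTake_apx (coeffs : List Int) (nt : Nat) :
    ∀ k < nt, (pvToP coeffs).coeff k = (pvToP (coeffs.take nt)).coeff k := by
  intro k hk
  rw [pvToP_coeff, pvToP_coeff, List.getD_eq_getElem?_getD, List.getD_eq_getElem?_getD,
    List.getElem?_take_of_lt hk]

-- both programs on power ≥ 2
theorem pvHigh (coeffs : List Int) (power : Int) (n_terms : Int)
    (hp : 2 ≤ power) (hn : 0 ≤ n_terms) :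
    poly_power coeffs power n_terms
      = pvTn n_terms.toNat ((pvToP (coeffs.take n_terms.toNat)) ^ power.toNat) ∧
    poly_power_alt coeffs power n_terms
      = pvTn n_terms.toNat ((pvToP (coeffs.take n_terms.toNat)) ^ power.toNat) := by
  have hslice : PySem.List.slice coeffs none (some n_terms) = coeffs.take n_terms.toNat :=
    PySem.List.slice_to _ hn
  constructor
  · show PySem.List.slice
        ((PySem.List.pyRange 1 power 1).foldl (fun cur _ => pvStepA coeffs n_terms.toNat cur)
          (PySem.List.slice coeffs none (some n_terms))) none (some n_terms) = _
    rw [pvFoldl_const, pvPyRange_len power hp, hslice]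
    have hm : (power - 1).toNat = (power.toNat - 1 - 1) + 1 := by omega
    rw [hm, pvIterA]
    rw [PySem.List.slice_to _ hn, List.take_of_length_le (by rw [pvTn_length])]
    refine pvTn_congr _ _ _ (fun k hk => ?_)
    have := pvMul_apx n_terms.toNat (pvToP (coeffs.take n_terms.toNat))
      (pvToP (coeffs.take n_terms.toNat)) ((pvToP coeffs) ^ (power.toNat - 1 - 1 + 1))
      ((pvToP (coeffs.take n_terms.toNat)) ^ (power.toNat - 1 - 1 + 1))
      (fun _ _ => rfl) (pvPow_apx n_terms.toNat _ _ (pvTake_apx coeffs n_terms.toNat) _) k hk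
    rw [this]
    congr 2
    rw [← pow_succ']
    congr 1
    omega
  · unfold poly_power_alt
    rw [if_neg (by omega), if_neg (by omega), hslice]
    rw [pvBLoop_none n_terms power.toNat power.toNat (by omega) le_rfl]
    rfl

-- ===== VERDICT (by name: the statement is the Claim_ definition above) =====
theorem poly_power_spec : Claim_unchanged_poly_power := by
  unfold Claim_unchanged_poly_power
  intro coeffs power n_terms _ hpre hnd
  obtain ⟨hn, _⟩ := hpre
  rcases Decidable.em (power = 0) with h0 | h0
  · subst h0
    have hA := pvA_low coeffs 0 n_terms (by omega) (by omega)
    unfold poly_power_alt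
    rw [if_pos rfl, hA]
    have htake : coeffs.take n_terms.toNat = (1 : Int) :: List.replicate (n_terms.toNat - 1) 0 := by
      by_contra hne
      exact hnd ⟨rfl, hne⟩
    rw [htake, (show (n_terms - 1).toNat = n_terms.toNat - 1 by omega)]
  · rcases Decidable.em (power ≤ 1) with hle | hle
    · rw [pvA_low coeffs power n_terms hle (by omega)]
      unfold poly_power_alt
      rw [if_neg h0, if_pos hle, PySem.List.slice_to _ (by omega)]
    · have h := pvHigh coeffs power n_terms (by omega) (by omega)
      rw [h.1, h.2]

theorem poly_power_changed : Claim_changed_poly_power := by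
  unfold Claim_changed_poly_power; decide

theorem poly_power_tight : Claim_exact_poly_power := by
  unfold Claim_exact_poly_power
  intro coeffs power n_terms _ hpre hd
  obtain ⟨hn, _⟩ := hpre
  obtain ⟨h0, hne⟩ := hd
  subst h0
  rw [pvA_low coeffs 0 n_terms (by omega) (by omega)]
  unfold poly_power_alt
  rw [if_pos rfl]
  have : (n_terms - 1).toNat = n_terms.toNat - 1 := by omega
  rw [this]
  exact hne
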